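-- pv_equiv track=rewrite | github.com/krystianbajno/encode-tools | encoder.py | unicode_surrogate_pairs_encode
-- ===== SOURCE A (Python) =====
-- def unicode_surrogate_pairs_encode(s):
--     """Create surrogate pair representations as escape sequences for UTF-16 attacks"""
--     result = ''
--     for c in s:
--         if ord(c) < 128:
--             # Create a surrogate pair representation as escape sequences
--             high_surrogate = 0xD800 + (ord(c) % 0x400)
--             low_surrogate = 0xDC00 + ((ord(c) * 7) % 0x400)
--             result += f'\\u{high_surrogate:04X}\\u{low_surrogate:04X}'
--         else:
--             result += c
--     return result
-- ===== SOURCE B (Python) =====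
-- def unicode_surrogate_pairs_encode(s):
--     """Create surrogate pair representations as escape sequences for UTF-16 attacks"""
--     n = len(s)
--     if n == 0:
--         return ''
--     if n == 1:
--         o = ord(s)
--         if o >= 128:
--             return s
--         # o < 128, so o % 0x400 == o and (o * 7) % 0x400 == o * 7 (7*127 = 889 < 1024):
--         # both mod operations of the spec are identities and the pair is computed directly.
--         return '\\u%04X\\u%04X' % (0xD800 + o, 0xDC00 + 7 * o)
--     m = n // 2
--     return unicode_surrogate_pairs_encode(s[:m]) + unicode_surrogate_pairs_encode(s[m:])
-- ===== Notes on version B (the rewrite author's own statement) =====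
-- stated objective: alternative
-- what changed: B replaces A's single left-to-right loop accumulating into a string by top-down divide-and-conquer recursion on string halves, whose one-character base case computes the pair directly as (0xD800+o, 0xDC00+7*o) since both `% 0x400` operations are identities for ordinals below 128.
import Mathlib
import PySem

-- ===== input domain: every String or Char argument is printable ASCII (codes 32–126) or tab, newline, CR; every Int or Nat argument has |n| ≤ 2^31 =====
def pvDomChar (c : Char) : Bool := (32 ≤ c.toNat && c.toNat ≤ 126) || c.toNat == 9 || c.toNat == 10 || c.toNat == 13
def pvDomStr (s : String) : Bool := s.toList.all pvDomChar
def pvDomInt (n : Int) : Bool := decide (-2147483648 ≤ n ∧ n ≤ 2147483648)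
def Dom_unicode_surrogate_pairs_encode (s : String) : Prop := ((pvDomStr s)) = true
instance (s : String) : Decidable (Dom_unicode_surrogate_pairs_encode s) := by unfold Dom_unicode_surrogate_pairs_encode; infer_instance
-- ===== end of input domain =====

-- B replaces A's left-to-right accumulating loop by divide-and-conquer recursion on
-- string halves whose one-char base case computes the pair directly (the `% 0x400`
-- of the spec are identities for ordinals below 128) — alternative decomposition.

-- f'{n:04X}' / '%04X' % n: exact for 0 ≤ n < 0x10000 (all values here lie in 0xD800..0xDFFF)
def pvHexDigit (n : Nat) : Char :=
  (PySem.List.pyGetD "0123456789ABCDEF".toList (n : Int) '0')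
def pvHex4 (n : Nat) : List Char :=
  [pvHexDigit (n / 4096 % 16), pvHexDigit (n / 256 % 16), pvHexDigit (n / 16 % 16), pvHexDigit (n % 16)]

-- ===== PORT A =====
-- the f-string body '\\uHHHH\\uLLLL' built for one character (ord c < 128)
def pvEscA (c : Char) : List Char :=
  '\\' :: 'u' :: pvHex4 (0xD800 + (PySem.Int.mod (c.toNat : Int) 0x400)).toNat
    ++ '\\' :: 'u' :: pvHex4 (0xDC00 + (PySem.Int.mod ((c.toNat : Int) * 7) 0x400)).toNat

def unicode_surrogate_pairs_encode (s : String) : String :=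
  String.ofList
    (s.toList.foldl
      (fun result c =>
        if (c.toNat : Int) < 128 then result ++ pvEscA c
        else result ++ [c])
      [])

-- ===== PORT B =====
-- '\\u%04X\\u%04X' % (0xD800 + o, 0xDC00 + 7 * o)
def pvEscB (o : Nat) : List Char :=
  '\\' :: 'u' :: pvHex4 (0xD800 + o) ++ '\\' :: 'u' :: pvHex4 (0xDC00 + 7 * o)

-- the recursion of Source B on the character list; s[:m] / s[m:] are List.take / List.drop
-- (exact: 0 ≤ m ≤ len s here)
def pvAltGo : List Char → List Char
  | [] => []
  | [c] => if 128 ≤ c.toNat then [c] else pvEscB c.toNat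
  | a :: b :: t =>
      let m := (a :: b :: t).length / 2
      pvAltGo ((a :: b :: t).take m) ++ pvAltGo ((a :: b :: t).drop m)
termination_by l => l.length
decreasing_by
  · simp only [List.length_take, List.length_cons]; omega
  · simp only [List.length_drop, List.length_cons]; omega

def unicode_surrogate_pairs_encode_alt (s : String) : String :=
  String.ofList (pvAltGo s.toList)

-- ===== PRECONDITION & SPEC =====
def Spec_unicode_surrogate_pairs_encode (s : String) (out : String) : Prop := out = unicode_surrogate_pairs_encode_alt s
instance (s : String) (out : String) : Decidable (Spec_unicode_surrogate_pairs_encode s out) := by unfold Spec_unicode_surrogate_pairs_encode; infer_instance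

-- ===== CLAIM (what is proved, stated in full; the proofs are below) =====
def Claim_equal_unicode_surrogate_pairs_encode : Prop := ∀ (s : String), Dom_unicode_surrogate_pairs_encode s → Spec_unicode_surrogate_pairs_encode s (unicode_surrogate_pairs_encode s)

-- ===== LEMMAS AND PROOFS =====

-- the per-character output both programs agree on
def pvMapC (c : Char) : List Char :=
  if 128 ≤ c.toNat then [c] else pvEscB c.toNat

-- for ord c < 128 the two mods in A's escape are identities and A's escape is B's
theorem escA_eq_escB (c : Char) (h : c.toNat < 128) : pvEscA c = pvEscB c.toNat := by
  unfold pvEscA pvEscB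
  rw [PySem.Int.mod_eq_emod_of_pos (by norm_num : (0:Int) < 1024), PySem.Int.mod_eq_emod_of_pos (by norm_num : (0:Int) < 1024)]
  have e1 : (0xD800 + (c.toNat : Int) % 1024).toNat = 0xD800 + c.toNat := by omega
  have e2 : (0xDC00 + ((c.toNat : Int) * 7) % 1024).toNat = 0xDC00 + 7 * c.toNat := by omega
  rw [e1, e2]

-- A's loop produces the flatMap of the per-character map
theorem foldA_eq (l : List Char) (acc : List Char) :
    l.foldl (fun result c => if (c.toNat : Int) < 128 then result ++ pvEscA c
                             else result ++ [c]) acc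
      = acc ++ l.flatMap pvMapC := by
  induction l generalizing acc with
  | nil => simp
  | cons a l ih =>
    simp only [List.foldl_cons, List.flatMap_cons, ih]
    by_cases h : a.toNat < 128
    · rw [if_pos (by exact_mod_cast h)]
      simp [pvMapC, escA_eq_escB a h, Nat.not_le.mpr h]
    · rw [if_neg (by exact_mod_cast h)]
      simp [pvMapC, Nat.le_of_not_lt h]

-- B's divide-and-conquer recursion produces the same flatMap
theorem altGo_eq (l : List Char) : pvAltGo l = l.flatMap pvMapC := by
  induction l using pvAltGo.induct with
  | case1 => simp [pvAltGo]
  | case2 c h => simp [pvAltGo, pvMapC, h]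
  | case3 c h => simp [pvAltGo, pvMapC, h]
  | case4 a b =>
    rename_i t m ih2 ih1
    rw [pvAltGo, ih1, ih2, ← List.flatMap_append, List.take_append_drop]

-- ===== VERDICT (by name: the statement is the Claim_ definition above) =====
theorem unicode_surrogate_pairs_encode_spec : Claim_equal_unicode_surrogate_pairs_encode := by
  intro s _
  unfold Spec_unicode_surrogate_pairs_encode
  unfold unicode_surrogate_pairs_encode unicode_surrogate_pairs_encode_alt
  rw [foldA_eq, altGo_eq, List.nil_append]
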